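-- pv_equiv track=rewrite | github.com/EliadCohen/withorbit-mnemonic | src/withorbit/obsidian/injector.py | _strip_existing_callouts
-- ===== SOURCE A (Python) =====
-- def _strip_existing_callouts(markdown_text: str) -> str:
--     """Remove all existing [!orbit] callouts for idempotent re-insertion."""
--     # Match callout blocks: start with "> [!orbit]" and continue while lines start with ">"
--     lines = markdown_text.split("\n")
--     result: list[str] = []
--     i = 0
--     while i < len(lines):
--         if lines[i].startswith("> [!orbit]"):
--             # Skip all lines of this callout (lines starting with ">")
--             while i < len(lines) and lines[i].startswith(">"):
--                 i += 1
--             # Skip trailing blank line after callout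
--             if i < len(lines) and lines[i].strip() == "":
--                 i += 1
--         else:
--             result.append(lines[i])
--             i += 1
--     return "\n".join(result)
-- ===== SOURCE B (Python) =====
-- def _strip_existing_callouts(markdown_text: str) -> str:
--     """Remove all existing [!orbit] callouts for idempotent re-insertion."""
--     result = []
--     in_callout = False
--     for line in markdown_text.split("\n"):
--         if in_callout:
--             if line.startswith(">"):
--                 continue
--             in_callout = False
--             if line.strip() == "":
--                 continue
--         if line.startswith("> [!orbit]"):
--             in_callout = True
--         else:
--             result.append(line)
--     return "\n".join(result)
-- ===== Notes on version B (the rewrite author's own statement) =====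
-- stated objective: simpler
-- what changed: Replaces A's index-based outer/inner while loops over a lines array with a single linear for-loop carrying an in_callout flag; the inner scan and index bookkeeping disappear.
import Mathlib
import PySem

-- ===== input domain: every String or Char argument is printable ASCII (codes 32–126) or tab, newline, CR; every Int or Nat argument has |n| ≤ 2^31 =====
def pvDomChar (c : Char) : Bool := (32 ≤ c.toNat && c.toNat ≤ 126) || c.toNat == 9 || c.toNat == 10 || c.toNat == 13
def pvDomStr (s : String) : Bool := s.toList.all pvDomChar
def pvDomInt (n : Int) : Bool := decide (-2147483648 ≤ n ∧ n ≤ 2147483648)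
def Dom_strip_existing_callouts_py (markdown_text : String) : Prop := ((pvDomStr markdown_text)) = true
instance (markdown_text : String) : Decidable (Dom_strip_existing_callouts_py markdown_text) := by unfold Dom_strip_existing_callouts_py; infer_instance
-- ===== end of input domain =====

-- B replaces A's index-based nested while loops with a single pass carrying an in_callout flag (objective: simpler).

-- ===== PORT A =====
-- a line starting with "> [!orbit]" also starts with ">" (cited by pyA_loop's decreasing_by)
theorem pv_orbit_starts_gt (l : String) (h : PySem.Str.startswith l "> [!orbit]" = true) :
    PySem.Str.startswith l ">" = true := by
  simp only [PySem.Str.startswith_eq, PySem.Chars.startswith_iff] at h ⊢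
  exact List.IsPrefix.trans (by decide) h

-- inner while: advance i past lines starting with ">"
def pyA_skip (lines : List String) (i : Nat) : Nat :=
  if h : i < lines.length then
    if PySem.Str.startswith lines[i] ">" then pyA_skip lines (i + 1) else i
  else i
termination_by lines.length - i

theorem pyA_skip_ge (lines : List String) (i : Nat) : i ≤ pyA_skip lines i := by
  unfold pyA_skip
  split
  · split
    · exact le_trans (Nat.le_succ i) (pyA_skip_ge lines (i + 1))
    · exact le_rfl
  · exact le_rfl
termination_by lines.length - i

theorem pyA_skip_gt (lines : List String) (i : Nat) (h : i < lines.length)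
    (hs : PySem.Str.startswith lines[i] ">" = true) : i + 1 ≤ pyA_skip lines i := by
  unfold pyA_skip
  simp only [h, hs, dif_pos, if_pos]
  exact pyA_skip_ge lines (i + 1)

-- outer while (the 'skip trailing blank line' step is the inner if on lines[i])
def pyA_loop (lines : List String) (i : Nat) (result : List String) : List String :=
  if h : i < lines.length then
    if ho : PySem.Str.startswith lines[i] "> [!orbit]" = true then
      if hj : pyA_skip lines i < lines.length then
        if PySem.Str.strip lines[pyA_skip lines i] = "" then
          pyA_loop lines (pyA_skip lines i + 1) result
        else
          pyA_loop lines (pyA_skip lines i) result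
      else
        pyA_loop lines (pyA_skip lines i) result
    else
      pyA_loop lines (i + 1) (result ++ [lines[i]])
  else result
termination_by lines.length - i
decreasing_by
  · have := pyA_skip_gt lines i h (pv_orbit_starts_gt _ ho); omega
  · have := pyA_skip_gt lines i h (pv_orbit_starts_gt _ ho); omega
  · have := pyA_skip_gt lines i h (pv_orbit_starts_gt _ ho); omega
  · omega

def strip_existing_callouts_py (markdown_text : String) : String :=
  PySem.Str.join "\n" (pyA_loop ((PySem.Str.split? markdown_text "\n").getD []) 0 [])

-- ===== PORT B =====
-- the fall-through of B's loop body once the flag is clear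
def pyB_normal (acc : List String) (line : String) : Bool × List String :=
  if PySem.Str.startswith line "> [!orbit]" then (true, acc) else (false, acc ++ [line])

-- one iteration of B's for-loop; state = (in_callout, result)
def pyB_step (st : Bool × List String) (line : String) : Bool × List String :=
  if st.1 then
    if PySem.Str.startswith line ">" then (true, st.2)
    else if PySem.Str.strip line = "" then (false, st.2)
    else pyB_normal st.2 line
  else pyB_normal st.2 line

def strip_existing_callouts_py_alt (markdown_text : String) : String :=
  PySem.Str.join "\n" ((((PySem.Str.split? markdown_text "\n").getD []).foldl pyB_step (false, [])).2)

-- ===== PRECONDITION & SPEC =====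
def Spec_strip_existing_callouts_py (markdown_text : String) (out : String) : Prop := out = strip_existing_callouts_py_alt markdown_text
instance (markdown_text : String) (out : String) : Decidable (Spec_strip_existing_callouts_py markdown_text out) := by unfold Spec_strip_existing_callouts_py; infer_instance

-- ===== CLAIM (what is proved, stated in full; the proofs are below) =====
def Claim_equal_strip_existing_callouts_py : Prop := ∀ (markdown_text : String), Dom_strip_existing_callouts_py markdown_text → Spec_strip_existing_callouts_py markdown_text (strip_existing_callouts_py markdown_text)

-- ===== LEMMAS AND PROOFS =====

-- reference functions both ports are reduced to: specF = normal mode, specG = inside a callout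
mutual
def specF : List String → List String
  | [] => []
  | l :: ls => if PySem.Str.startswith l "> [!orbit]" then specG ls else l :: specF ls
def specG : List String → List String
  | [] => []
  | l :: ls =>
    if PySem.Str.startswith l ">" then specG ls
    else if PySem.Str.strip l = "" then specF ls else l :: specF ls
end

-- what remains after the inner skip: maybe drop one blank line, then back to normal mode
def specH : List String → List String
  | [] => []
  | r :: rs => if PySem.Str.strip r = "" then specF rs else r :: specF rs

theorem dropWhile_head_false {α : Type} (p : α → Bool) (ls : List α) (r : α) (rs : List α)
    (h : ls.dropWhile p = r :: rs) : p r = false := by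
  induction ls with
  | nil => simp at h
  | cons l ls ih =>
    rw [List.dropWhile_cons] at h
    split at h
    · exact ih h
    · rename_i hp
      cases hpr : p l
      · cases h; exact hpr
      · exact absurd hpr hp

theorem specG_eq (ls : List String) :
    specG ls = specH (ls.dropWhile (fun l => PySem.Str.startswith l ">")) := by
  induction ls with
  | nil => rfl
  | cons l ls ih =>
    have e : specG (l :: ls) = if PySem.Str.startswith l ">" then specG ls
        else if PySem.Str.strip l = "" then specF ls else l :: specF ls := rfl
    rw [e, List.dropWhile_cons]
    cases hsw : PySem.Str.startswith l ">" with
    | true =>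
      show specG ls = specH (List.dropWhile (fun l => PySem.Str.startswith l ">") ls)
      exact ih
    | false => rfl

theorem pyA_skip_drop (lines : List String) (i : Nat) :
    lines.drop (pyA_skip lines i) = (lines.drop i).dropWhile (fun l => PySem.Str.startswith l ">") := by
  unfold pyA_skip
  split
  · rename_i h
    split
    · rename_i hs
      rw [pyA_skip_drop lines (i + 1), List.drop_eq_getElem_cons h, List.dropWhile_cons, if_pos hs]
    · rename_i hs
      rw [List.drop_eq_getElem_cons h, List.dropWhile_cons, if_neg hs]
  · rename_i h
    rw [List.drop_eq_nil_of_le (Nat.le_of_not_lt h), List.dropWhile_nil]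
termination_by lines.length - i

theorem pyA_loop_eq (lines : List String) (i : Nat) (result : List String) :
    pyA_loop lines i result = result ++ specF (lines.drop i) := by
  unfold pyA_loop
  split
  · rename_i h
    have hd : lines.drop i = lines[i] :: lines.drop (i + 1) := List.drop_eq_getElem_cons h
    split
    · rename_i ho
      have hgt : PySem.Str.startswith lines[i] ">" = true := pv_orbit_starts_gt _ ho
      have hdropj : lines.drop (pyA_skip lines i)
          = (lines.drop (i + 1)).dropWhile (fun l => PySem.Str.startswith l ">") := by
        rw [pyA_skip_drop, hd, List.dropWhile_cons, if_pos hgt]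
      have hrhs : specF (lines.drop i) = specG (lines.drop (i + 1)) := by
        rw [hd]
        have e : specF (lines[i] :: lines.drop (i + 1))
            = if PySem.Str.startswith lines[i] "> [!orbit]" then specG (lines.drop (i + 1))
              else lines[i] :: specF (lines.drop (i + 1)) := rfl
        rw [e, if_pos ho]
      rw [hrhs, specG_eq, ← hdropj]
      split
      · rename_i hj
        have hdj : lines.drop (pyA_skip lines i)
            = lines[pyA_skip lines i] :: lines.drop (pyA_skip lines i + 1) :=
          List.drop_eq_getElem_cons hj
        rw [hdj]
        have eH : specH (lines[pyA_skip lines i] :: lines.drop (pyA_skip lines i + 1))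
            = if PySem.Str.strip lines[pyA_skip lines i] = ""
              then specF (lines.drop (pyA_skip lines i + 1))
              else lines[pyA_skip lines i] :: specF (lines.drop (pyA_skip lines i + 1)) := rfl
        rw [eH]
        split
        · rename_i hb
          exact pyA_loop_eq lines (pyA_skip lines i + 1) result
        · rename_i hb
          rw [pyA_loop_eq lines (pyA_skip lines i) result, hdj]
          have hcons : (lines.drop (i + 1)).dropWhile (fun l => PySem.Str.startswith l ">")
              = lines[pyA_skip lines i] :: lines.drop (pyA_skip lines i + 1) := by
            rw [← hdropj, hdj]
          have hnr : PySem.Str.startswith lines[pyA_skip lines i] ">" = false := by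
            simpa using dropWhile_head_false _ _ _ _ hcons
          have hno : ¬ PySem.Str.startswith lines[pyA_skip lines i] "> [!orbit]" = true := by
            intro hc
            rw [pv_orbit_starts_gt _ hc] at hnr
            exact Bool.true_eq_false.mp hnr
          have eF : specF (lines[pyA_skip lines i] :: lines.drop (pyA_skip lines i + 1))
              = if PySem.Str.startswith lines[pyA_skip lines i] "> [!orbit]"
                then specG (lines.drop (pyA_skip lines i + 1))
                else lines[pyA_skip lines i] :: specF (lines.drop (pyA_skip lines i + 1)) := rfl
          rw [eF, if_neg hno]
      · rename_i hj
        have hdj : lines.drop (pyA_skip lines i) = [] :=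
          List.drop_eq_nil_of_le (Nat.le_of_not_lt hj)
        rw [pyA_loop_eq lines (pyA_skip lines i) result, hdj]
        rfl
    · rename_i ho
      rw [pyA_loop_eq lines (i + 1) (result ++ [lines[i]]), hd]
      have eF : specF (lines[i] :: lines.drop (i + 1))
          = if PySem.Str.startswith lines[i] "> [!orbit]" then specG (lines.drop (i + 1))
            else lines[i] :: specF (lines.drop (i + 1)) := rfl
      rw [eF, if_neg ho]
      simp
  · rename_i h
    rw [List.drop_eq_nil_of_le (Nat.le_of_not_lt h)]
    simp [specF]
termination_by lines.length - i
decreasing_by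
  all_goals
    first
      | omega
      | (have := pyA_skip_gt lines i (by assumption) (pv_orbit_starts_gt _ (by assumption)); omega)

theorem pyB_fold (ls : List String) :
    (∀ acc, (ls.foldl pyB_step (false, acc)).2 = acc ++ specF ls) ∧
    (∀ acc, (ls.foldl pyB_step (true, acc)).2 = acc ++ specG ls) := by
  induction ls with
  | nil => simp [specF, specG]
  | cons l ls ih =>
    constructor
    · intro acc
      have e : List.foldl pyB_step (false, acc) (l :: ls)
          = List.foldl pyB_step (pyB_normal acc l) ls := rfl
      have eF : specF (l :: ls) = if PySem.Str.startswith l "> [!orbit]" then specG ls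
          else l :: specF ls := rfl
      rw [e, eF]
      unfold pyB_normal
      split
      · exact ih.2 acc
      · rw [ih.1 (acc ++ [l])]
        simp
    · intro acc
      have e : List.foldl pyB_step (true, acc) (l :: ls)
          = List.foldl pyB_step
              (if PySem.Str.startswith l ">" then (true, acc)
               else if PySem.Str.strip l = "" then (false, acc)
               else pyB_normal acc l) ls := rfl
      have eG : specG (l :: ls) = if PySem.Str.startswith l ">" then specG ls
          else if PySem.Str.strip l = "" then specF ls else l :: specF ls := rfl
      rw [e, eG]
      split
      · exact ih.2 acc
      · rename_i hg
        split
        · exact ih.1 acc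
        · have ho : ¬ PySem.Str.startswith l "> [!orbit]" = true := by
            intro hc
            exact hg (pv_orbit_starts_gt _ hc)
          unfold pyB_normal
          rw [if_neg ho, ih.1 (acc ++ [l])]
          simp

-- ===== VERDICT (by name: the statement is the Claim_ definition above) =====
theorem strip_existing_callouts_py_spec : Claim_equal_strip_existing_callouts_py := by
  intro markdown_text _
  unfold Spec_strip_existing_callouts_py strip_existing_callouts_py strip_existing_callouts_py_alt
  rw [pyA_loop_eq, (pyB_fold _).1 []]
  simp
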